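-- pv_equiv track=rewrite | github.com/DragonlordNewb/clearsight | clearsight_3/utils.py | multipleTargetIdentify
-- ===== SOURCE A (Python) =====
-- def multipleTargetIdentify(l, ts):
--     out = []
--     current = []
--     for i in l:
--         if i[1] in ts:
--             current.append(i)
--         else:
--             out.append(current)
--             current = []
--     return [i for i in out if len(i) > 0]
-- ===== SOURCE B (Python) =====
-- def multipleTargetIdentify(l, ts):
--     res = []
--     n = len(l)
--     i = 0
--     while i < n:
--         j = i
--         while j < n and l[j][1] in ts:
--             j += 1
--         if j == n:
--             break
--         if j > i:
--             res.append(l[i:j])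
--         i = j + 1
--     return res
-- ===== Notes on version B (the rewrite author's own statement) =====
-- stated objective: alternative
-- what changed: B scans run boundaries with two indices and appends whole slices l[i:j], instead of A's element-by-element accumulation into a 'current' list (including empty ones) followed by a final non-empty filter.
import Mathlib
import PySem

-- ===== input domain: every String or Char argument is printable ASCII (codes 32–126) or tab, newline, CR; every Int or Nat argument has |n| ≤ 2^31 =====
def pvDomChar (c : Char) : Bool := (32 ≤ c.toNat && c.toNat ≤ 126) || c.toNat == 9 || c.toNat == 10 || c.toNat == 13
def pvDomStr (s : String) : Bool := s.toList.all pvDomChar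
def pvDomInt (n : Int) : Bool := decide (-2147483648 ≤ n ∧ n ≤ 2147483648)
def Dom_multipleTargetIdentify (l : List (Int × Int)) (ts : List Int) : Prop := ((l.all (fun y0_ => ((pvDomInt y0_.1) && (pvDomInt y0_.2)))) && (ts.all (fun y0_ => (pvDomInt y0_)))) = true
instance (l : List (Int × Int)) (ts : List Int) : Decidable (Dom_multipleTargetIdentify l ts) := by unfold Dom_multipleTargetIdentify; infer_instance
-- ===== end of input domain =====

-- B replaces A's element-by-element accumulation (and final non-empty filter) with a
-- two-index scan over run boundaries that appends whole slices l[i:j]; objective: alternative.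

-- ===== PORT A =====
def multipleTargetIdentify (l : List (Int × Int)) (ts : List Int) : List (List (Int × Int)) :=
  let s := l.foldl
    (fun (s : List (List (Int × Int)) × List (Int × Int)) i =>
      if i.2 ∈ ts then (s.1, s.2 ++ [i]) else (s.1 ++ [s.2], []))
    ([], [])
  s.1.filter (fun i => decide (i.length > 0))

-- ===== PORT B =====
-- inner while loop of Source B: advance j while j < n and l[j][1] in ts
def mtiRunEnd (l : List (Int × Int)) (ts : List Int) (j : Nat) : Nat :=
  if h : j < l.length then
    if (l[j]'h).2 ∈ ts then mtiRunEnd l ts (j + 1) else j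
  else j
termination_by l.length - j

-- lemmas the outer loop's termination needs (cited in its decreasing_by)
theorem mtiRunEnd_ge (l : List (Int × Int)) (ts : List Int) (j : Nat) :
    j ≤ mtiRunEnd l ts j := by
  unfold mtiRunEnd
  split
  · split
    · have := mtiRunEnd_ge l ts (j + 1); omega
    · exact Nat.le_refl j
  · exact Nat.le_refl j
termination_by l.length - j

-- outer while loop of Source B, state = index i (res is built by the recursion front-to-back)
def mtiGo (l : List (Int × Int)) (ts : List Int) (i : Nat) : List (List (Int × Int)) :=
  if hi : i < l.length then
    if _hj : mtiRunEnd l ts i = l.length then []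
    else
      (if i < mtiRunEnd l ts i then
        [PySem.List.slice l (some (i : Int)) (some ((mtiRunEnd l ts i : Nat) : Int))] else []) ++
        mtiGo l ts (mtiRunEnd l ts i + 1)
  else []
termination_by l.length - i
decreasing_by
  have h1 := mtiRunEnd_ge l ts i
  omega

def multipleTargetIdentify_alt (l : List (Int × Int)) (ts : List Int) : List (List (Int × Int)) :=
  mtiGo l ts 0

-- ===== PRECONDITION & SPEC =====
def Spec_multipleTargetIdentify (l : List (Int × Int)) (ts : List Int) (out : List (List (Int × Int))) : Prop := out = multipleTargetIdentify_alt l ts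
instance (l : List (Int × Int)) (ts : List Int) (out : List (List (Int × Int))) : Decidable (Spec_multipleTargetIdentify l ts out) := by unfold Spec_multipleTargetIdentify; infer_instance

-- ===== CLAIM (what is proved, stated in full; the proofs are below) =====
def Claim_equal_multipleTargetIdentify : Prop := ∀ (l : List (Int × Int)) (ts : List Int), Dom_multipleTargetIdentify l ts → Spec_multipleTargetIdentify l ts (multipleTargetIdentify l ts)

-- ===== LEMMAS AND PROOFS =====

theorem mtiRunEnd_le (l : List (Int × Int)) (ts : List Int) (j : Nat) (h : j ≤ l.length) :
    mtiRunEnd l ts j ≤ l.length := by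
  unfold mtiRunEnd
  split
  · split
    · exact mtiRunEnd_le l ts (j + 1) (by omega)
    · omega
  · omega
termination_by l.length - j

-- generic takeWhile/dropWhile facts used below
theorem pvTwLen {a : Type} (p : a -> Bool) (m : List a) : (m.takeWhile p).length <= m.length := by
  induction m with
  | nil => simp
  | cons x r ih => by_cases hx : p x <;> simp [hx] <;> omega

theorem pvTwTake {a : Type} (p : a -> Bool) (m : List a) : m.takeWhile p = m.take (m.takeWhile p).length := by
  induction m with
  | nil => simp
  | cons x r ih => by_cases hx : p x <;> simp [hx] <;> exact ih

theorem pvDwDrop {a : Type} (p : a -> Bool) (m : List a) : m.dropWhile p = m.drop (m.takeWhile p).length := by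
  induction m with
  | nil => simp
  | cons x r ih => by_cases hx : p x <;> simp [hx] <;> exact ih

-- common reference function: groups of consecutive in-ts items, trailing run dropped
def mtiSpec (ts : List Int) : List (Int × Int) -> List (Int × Int) -> List (List (Int × Int))
  | _, [] => []
  | cur, x :: r =>
    if x.2 ∈ ts then mtiSpec ts (cur ++ [x]) r
    else (if cur = [] then [] else [cur]) ++ mtiSpec ts [] r

theorem mtiSpec_span (ts : List Int) (m cur : List (Int × Int)) :
    mtiSpec ts cur m =
      if (m.dropWhile (fun x => decide (x.2 ∈ ts))) = [] then []
      else
        (if cur ++ m.takeWhile (fun x => decide (x.2 ∈ ts)) = [] then []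
         else [cur ++ m.takeWhile (fun x => decide (x.2 ∈ ts))]) ++
          mtiSpec ts [] ((m.dropWhile (fun x => decide (x.2 ∈ ts))).tail) := by
  induction m generalizing cur with
  | nil => simp [mtiSpec]
  | cons x r ih =>
    by_cases hx : x.2 ∈ ts
    · have hd : List.dropWhile (fun y => decide (y.2 ∈ ts)) (x :: r) =
          List.dropWhile (fun y => decide (y.2 ∈ ts)) r := by simp [hx]
      have ht : List.takeWhile (fun y => decide (y.2 ∈ ts)) (x :: r) =
          x :: List.takeWhile (fun y => decide (y.2 ∈ ts)) r := by simp [hx]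
      rw [mtiSpec, if_pos hx, ih (cur ++ [x]), hd, ht]
      simp
    · have hd : List.dropWhile (fun y => decide (y.2 ∈ ts)) (x :: r) = x :: r := by simp [hx]
      have ht : List.takeWhile (fun y => decide (y.2 ∈ ts)) (x :: r) = [] := by simp [hx]
      rw [mtiSpec, if_neg hx, hd, ht]
      simp

theorem mtiRunEnd_eq (l : List (Int × Int)) (ts : List Int) (i : Nat) (h : i <= l.length) :
    mtiRunEnd l ts i = i + ((l.drop i).takeWhile (fun x => decide (x.2 ∈ ts))).length := by
  unfold mtiRunEnd
  split
  · rename_i hi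
    by_cases hx : (l[i]'hi).2 ∈ ts
    · rw [if_pos hx, mtiRunEnd_eq l ts (i + 1) (by omega), List.drop_eq_getElem_cons hi]
      simp only [List.takeWhile_cons]
      rw [if_pos (by simpa using hx)]
      simp only [List.length_cons]
      omega
    · rw [if_neg hx, List.drop_eq_getElem_cons hi]
      simp only [List.takeWhile_cons]
      rw [if_neg (by simpa using hx)]
      simp
  · rename_i hi
    rw [List.drop_eq_nil_of_le (by omega)]
    simp
termination_by l.length - i

theorem mtiGo_eq (l : List (Int × Int)) (ts : List Int) (i : Nat) (h : i <= l.length) :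
    mtiGo l ts i = mtiSpec ts [] (l.drop i) := by
  have hij := mtiRunEnd_ge l ts i
  have hre := mtiRunEnd_eq l ts i h
  have htwlen := pvTwLen (fun x => decide (x.2 ∈ ts)) (l.drop i)
  have htake := pvTwTake (fun x => decide (x.2 ∈ ts)) (l.drop i)
  have hdropw := pvDwDrop (fun x => decide (x.2 ∈ ts)) (l.drop i)
  have hmlen : (l.drop i).length = l.length - i := by simp
  unfold mtiGo
  split
  · rename_i hi
    split
    · rename_i hj
      have hlen : ((l.drop i).takeWhile (fun x => decide (x.2 ∈ ts))).length =
          (l.drop i).length := by omega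
      have hnil : (l.drop i).dropWhile (fun x => decide (x.2 ∈ ts)) = [] := by
        rw [hdropw, hlen, List.drop_length]
      rw [mtiSpec_span, if_pos hnil]
    · rename_i hj
      have hjlt : mtiRunEnd l ts i < l.length := by
        have := mtiRunEnd_le l ts i h
        omega
      have hslice : PySem.List.slice l (some (i : Int)) (some ((mtiRunEnd l ts i : Nat) : Int)) =
          (l.drop i).takeWhile (fun x => decide (x.2 ∈ ts)) := by
        rw [PySem.List.slice_natCast]
        have he : mtiRunEnd l ts i - i =
            ((l.drop i).takeWhile (fun x => decide (x.2 ∈ ts))).length := by omega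
        rw [he, ← htake]
      have hdd : (l.drop i).drop ((l.drop i).takeWhile (fun x => decide (x.2 ∈ ts))).length =
          l.drop (mtiRunEnd l ts i) := by
        rw [List.drop_drop]
        congr 1
        omega
      have hdropne : (l.drop i).dropWhile (fun x => decide (x.2 ∈ ts)) ≠ [] := by
        rw [hdropw, hdd]
        intro hnil
        have := List.drop_eq_nil_iff.mp hnil
        omega
      have htail : ((l.drop i).dropWhile (fun x => decide (x.2 ∈ ts))).tail =
          l.drop (mtiRunEnd l ts i + 1) := by
        rw [hdropw, hdd, List.tail_drop]
      rw [mtiGo_eq l ts (mtiRunEnd l ts i + 1) (by omega)]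
      rw [mtiSpec_span ts (l.drop i) [], if_neg hdropne, List.nil_append, htail]
      by_cases hne : i < mtiRunEnd l ts i
      · have hnn : (l.drop i).takeWhile (fun x => decide (x.2 ∈ ts)) ≠ [] := by
          intro hnil
          rw [hnil] at hre
          simp at hre
          omega
        rw [if_pos hne, if_neg hnn, hslice]
      · have hz : (l.drop i).takeWhile (fun x => decide (x.2 ∈ ts)) = [] := by
          have h0 : ((l.drop i).takeWhile (fun x => decide (x.2 ∈ ts))).length = 0 := by omega
          exact List.length_eq_zero_iff.mp h0
        rw [if_neg hne, if_pos hz]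
  · rename_i hi
    have hnil : l.drop i = [] := List.drop_eq_nil_of_le (by omega)
    rw [hnil, mtiSpec]
termination_by l.length - i
decreasing_by
  omega

theorem mtiFold_eq (ts : List Int) (m : List (Int × Int))
    (out : List (List (Int × Int))) (cur : List (Int × Int)) :
    ((m.foldl
        (fun (s : List (List (Int × Int)) × List (Int × Int)) i =>
          if i.2 ∈ ts then (s.1, s.2 ++ [i]) else (s.1 ++ [s.2], []))
        (out, cur)).1).filter (fun i => decide (i.length > 0)) =
      out.filter (fun i => decide (i.length > 0)) ++ mtiSpec ts cur m := by
  induction m generalizing out cur with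
  | nil => simp [mtiSpec]
  | cons x r ih =>
    by_cases hx : x.2 ∈ ts
    · simp only [List.foldl_cons, if_pos hx]
      rw [ih, mtiSpec, if_pos hx]
    · simp only [List.foldl_cons, if_neg hx]
      rw [ih, mtiSpec, if_neg hx]
      rw [List.filter_append]
      by_cases hc : cur = []
      · simp [hc]
      · have hpos : 0 < cur.length := List.length_pos_of_ne_nil hc
        simp [hc, List.filter, hpos]

-- ===== VERDICT (by name: the statement is the Claim_ definition above) =====
theorem multipleTargetIdentify_spec : Claim_equal_multipleTargetIdentify := by
  intro l ts _
  unfold Spec_multipleTargetIdentify multipleTargetIdentify multipleTargetIdentify_alt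
  rw [mtiGo_eq l ts 0 (by omega), List.drop_zero]
  simpa using mtiFold_eq ts l [] []
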